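-- pv_equiv track=rewrite | github.com/ahmedelhadidy/HGRAR | utils/datapartitional.py | get_new_combinations
-- ===== SOURCE A (Python) =====
-- def get_new_combinations(old_values:[], new_values:[], output_join_length):
--     assert output_join_length  > 1
--     old_values_participants = output_join_length-1
--     i1 = range(len(old_values) + len(new_values))
--     i2 = range(len(old_values), len(old_values) + len(new_values))
--     all_values = old_values + new_values
--     for itr1 in i1:
--         for itr2 in i2:
--             if itr1 >= itr2:
--                 continue
--             join = [None] * output_join_length
--             join[0] = all_values[itr1]
--             for remains_participants in range(1, old_values_participants):
--                 if itr1+remains_participants >= itr2: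
--                     continue
--                 join[remains_participants] = all_values[itr1+remains_participants]
--             join[-1] = all_values[itr2]
--             if None not in join:
--                 yield tuple(join)
-- ===== SOURCE B (Python) =====
-- def get_new_combinations(old_values, new_values, output_join_length):
--     assert output_join_length > 1
--     all_values = old_values + new_values
--     n = len(old_values)
--     total = len(all_values)
--     k = output_join_length - 1
--     for itr1 in range(total):
--         block = all_values[itr1:itr1 + k]
--         for itr2 in range(max(n, itr1 + k), total):
--             yield tuple(block + [all_values[itr2]])
-- ===== Notes on version B (the rewrite author's own statement) =====
-- stated objective: faster
-- what changed: Instead of scanning every (itr1, itr2) pair and building a None-sentinel join that is discarded when a hole remains, B slices the consecutive block once per itr1 and iterates itr2 only over the valid range max(n, itr1+L-1)..total, emitting every tuple directly.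
import Mathlib
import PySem

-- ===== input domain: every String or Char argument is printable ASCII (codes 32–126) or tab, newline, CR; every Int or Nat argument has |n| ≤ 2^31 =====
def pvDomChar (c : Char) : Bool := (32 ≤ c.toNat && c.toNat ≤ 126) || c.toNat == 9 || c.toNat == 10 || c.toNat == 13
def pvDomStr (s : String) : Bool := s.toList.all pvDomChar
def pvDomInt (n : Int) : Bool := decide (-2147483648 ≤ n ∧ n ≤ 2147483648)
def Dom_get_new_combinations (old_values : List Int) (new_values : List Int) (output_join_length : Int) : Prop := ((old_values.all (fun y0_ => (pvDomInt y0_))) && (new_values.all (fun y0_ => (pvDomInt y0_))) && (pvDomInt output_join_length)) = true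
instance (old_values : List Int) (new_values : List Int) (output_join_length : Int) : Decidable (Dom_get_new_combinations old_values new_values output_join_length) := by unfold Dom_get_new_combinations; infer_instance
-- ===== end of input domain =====

-- B enumerates only the valid (itr1, itr2) pairs and slices the consecutive block once per itr1,
-- instead of A's scan of all pairs with a None-sentinel join rebuilt and possibly discarded each time.

-- ===== PORT A =====
def get_new_combinations (old_values : List Int) (new_values : List Int) (output_join_length : Int) : List (List Int) :=
  let old_values_participants := output_join_length - 1
  let i1 := PySem.List.pyRange 0 ((old_values.length : Int) + (new_values.length : Int)) 1
  let i2 := PySem.List.pyRange (old_values.length : Int) ((old_values.length : Int) + (new_values.length : Int)) 1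
  let all_values := old_values ++ new_values
  i1.foldl (fun acc itr1 =>
    i2.foldl (fun acc itr2 =>
      if itr1 ≥ itr2 then acc
      else
        let join0 : List (Option Int) := List.replicate output_join_length.toNat none
        let join1 := PySem.List.pySetD join0 0 (some (PySem.List.pyGetD all_values itr1 0))
        let join2 := (PySem.List.pyRange 1 old_values_participants 1).foldl
          (fun j rp => if itr1 + rp ≥ itr2 then j
            else PySem.List.pySetD j rp (some (PySem.List.pyGetD all_values (itr1 + rp) 0))) join1
        let join3 := PySem.List.pySetD join2 (-1) (some (PySem.List.pyGetD all_values itr2 0))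
        if none ∉ join3 then acc ++ [join3.filterMap id] else acc) acc) []

-- ===== PORT B =====
def get_new_combinations_alt (old_values : List Int) (new_values : List Int) (output_join_length : Int) : List (List Int) :=
  let all_values := old_values ++ new_values
  let n : Int := old_values.length
  let total : Int := all_values.length
  let k := output_join_length - 1
  (PySem.List.pyRange 0 total 1).foldl (fun acc itr1 =>
    let block := PySem.List.slice all_values (some itr1) (some (itr1 + k))
    (PySem.List.pyRange (max n (itr1 + k)) total 1).foldl (fun acc itr2 =>
      acc ++ [block ++ [PySem.List.pyGetD all_values itr2 0]]) acc) []

-- ===== PRECONDITION & SPEC =====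
-- Pre_ excludes exactly the inputs where Python A raises: output_join_length ≤ 1 fails A's assert.
def Pre_get_new_combinations (old_values : List Int) (new_values : List Int) (output_join_length : Int) : Prop :=
  1 < output_join_length
instance (old_values : List Int) (new_values : List Int) (output_join_length : Int) : Decidable (Pre_get_new_combinations old_values new_values output_join_length) := by unfold Pre_get_new_combinations; infer_instance
def pvWitness_get_new_combinations : List Int × List Int × Int := ([1, 2], [3, 4], 2)

def Spec_get_new_combinations (old_values : List Int) (new_values : List Int) (output_join_length : Int) (out : List (List Int)) : Prop := out = get_new_combinations_alt old_values new_values output_join_length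
instance (old_values : List Int) (new_values : List Int) (output_join_length : Int) (out : List (List Int)) : Decidable (Spec_get_new_combinations old_values new_values output_join_length out) := by unfold Spec_get_new_combinations; infer_instance

-- ===== CLAIM (what is proved, stated in full; the proofs are below) =====
def Claim_equal_get_new_combinations : Prop := ∀ (old_values : List Int) (new_values : List Int) (output_join_length : Int), Dom_get_new_combinations old_values new_values output_join_length → Pre_get_new_combinations old_values new_values output_join_length → Spec_get_new_combinations old_values new_values output_join_length (get_new_combinations old_values new_values output_join_length)

-- ===== LEMMAS AND PROOFS =====

-- Length is preserved by the join-filling fold.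
lemma joinFold_length (all : List Int) (itr1 itr2 : Int) :
    ∀ (k : Nat) (a b : Int) (l : List (Option Int)), k = (b - a).toNat →
    ((PySem.List.pyRange a b 1).foldl
      (fun j rp => if itr1 + rp ≥ itr2 then j
        else PySem.List.pySetD j rp (some (PySem.List.pyGetD all (itr1 + rp) 0))) l).length = l.length := by
  intro k
  induction k with
  | zero =>
    intro a b l hk
    rw [PySem.List.pyRange_one_eq_nil (by omega)]
    rfl
  | succ k ih =>
    intro a b l hk
    rw [PySem.List.pyRange_one_cons (by omega), List.foldl_cons]
    rw [ih (a + 1) b _ (by omega)]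
    by_cases h : itr1 + a ≥ itr2
    · simp [h]
    · simp [h, PySem.List.length_pySetD]

-- Pointwise characterisation of the join-filling fold.
lemma joinFold_getElem? (all : List Int) (itr1 itr2 : Int) :
    ∀ (k : Nat) (a b : Int) (l : List (Option Int)) (m : Nat), k = (b - a).toNat → 0 ≤ a →
    b ≤ (l.length : Int) →
    ((PySem.List.pyRange a b 1).foldl
      (fun j rp => if itr1 + rp ≥ itr2 then j
        else PySem.List.pySetD j rp (some (PySem.List.pyGetD all (itr1 + rp) 0))) l)[m]? =
    if a ≤ (m : Int) ∧ (m : Int) < b ∧ itr1 + m < itr2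
    then some (some (PySem.List.pyGetD all (itr1 + m) 0)) else l[m]? := by
  intro k
  induction k with
  | zero =>
    intro a b l m hk ha hb
    rw [PySem.List.pyRange_one_eq_nil (by omega), List.foldl_nil, if_neg (by omega)]
  | succ k ih =>
    intro a b l m hk ha hb
    rw [PySem.List.pyRange_one_cons (by omega), List.foldl_cons]
    by_cases h : itr1 + a ≥ itr2
    · rw [if_pos h, ih (a + 1) b l m (by omega) (by omega) (by omega)]
      by_cases hc : a + 1 ≤ (m : Int) ∧ (m : Int) < b ∧ itr1 + m < itr2
      · rw [if_pos hc, if_pos (by omega)]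
      · rw [if_neg hc, if_neg (by omega)]
    · rw [if_neg h, ih (a + 1) b _ m (by omega) (by omega)
        (by rw [PySem.List.length_pySetD]; omega)]
      by_cases hc : a + 1 ≤ (m : Int) ∧ (m : Int) < b ∧ itr1 + m < itr2
      · rw [if_pos hc, if_pos (by omega)]
      · rw [if_neg hc, PySem.List.pySetD_of_nonneg _ _ ha, List.getElem?_set]
        by_cases hm : (m : Int) = a
        · have hma : a.toNat = m := by omega
          rw [if_pos hma, if_pos (by omega), if_pos (by omega), hm]
        · rw [if_neg (by omega), if_neg (by omega)]

-- Filtering a step-1 range by (c ≤ ·) clips its lower end.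
lemma filter_pyRange_ge (c : Int) :
    ∀ (k : Nat) (a b : Int), k = (b - a).toNat →
    (PySem.List.pyRange a b 1).filter (fun x => decide (c ≤ x)) = PySem.List.pyRange (max a c) b 1 := by
  intro k
  induction k with
  | zero =>
    intro a b hk
    rw [PySem.List.pyRange_one_eq_nil (by omega), PySem.List.pyRange_one_eq_nil (by omega)]
    rfl
  | succ k ih =>
    intro a b hk
    rw [PySem.List.pyRange_one_cons (by omega), List.filter_cons]
    by_cases h : c ≤ a
    · rw [if_pos (by simpa using h), ih (a + 1) b (by omega)]
      have h1 : max a c = a := by omega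
      have h2 : max (a + 1) c = a + 1 := by omega
      rw [h1, h2]
      exact (PySem.List.pyRange_one_cons (by omega)).symm
    · rw [if_neg (by simpa using h), ih (a + 1) b (by omega)]
      have h1 : max a c = c := by omega
      have h2 : max (a + 1) c = c := by omega
      rw [h1, h2]

-- The completed join (when the block fits) is the sliced block plus the new value, all wrapped in `some`.
lemma join_full (all : List Int) (L itr1 itr2 : Int) (hL : 1 < L) (h0 : 0 ≤ itr1)
    (hfit : itr1 + (L - 1) ≤ itr2) (h2 : itr2 < (all.length : Int)) :
    PySem.List.pySetD
      ((PySem.List.pyRange 1 (L - 1) 1).foldl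
        (fun j rp => if itr1 + rp ≥ itr2 then j
          else PySem.List.pySetD j rp (some (PySem.List.pyGetD all (itr1 + rp) 0)))
        (PySem.List.pySetD (List.replicate L.toNat none) 0 (some (PySem.List.pyGetD all itr1 0))))
      (-1) (some (PySem.List.pyGetD all itr2 0)) =
    (PySem.List.slice all (some itr1) (some (itr1 + (L - 1)))).map some
      ++ [some (PySem.List.pyGetD all itr2 0)] := by
  have hd : (L - 1).toNat ≤ all.length - itr1.toNat := by omega
  have hdlen : itr1.toNat + (L - 1).toNat ≤ all.length := by omega
  set j1 := PySem.List.pySetD (List.replicate L.toNat none) 0 (some (PySem.List.pyGetD all itr1 0)) with hj1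
  have hj1len : j1.length = L.toNat := by
    simp [hj1, PySem.List.pySetD_of_nonneg _ _ (le_refl (0 : Int))]
  set j2 := (PySem.List.pyRange 1 (L - 1) 1).foldl
      (fun j rp => if itr1 + rp ≥ itr2 then j
        else PySem.List.pySetD j rp (some (PySem.List.pyGetD all (itr1 + rp) 0))) j1 with hj2
  have hj2len : j2.length = L.toNat := by
    rw [hj2, joinFold_length all itr1 itr2 (L - 1 - 1).toNat 1 (L - 1) j1 rfl, hj1len]
  have hne : j2 ≠ [] := by
    intro h; rw [h] at hj2len; simp at hj2len; omega
  have hset : PySem.List.pySetD j2 (-1) (some (PySem.List.pyGetD all itr2 0))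
      = j2.set (j2.length - 1) (some (PySem.List.pyGetD all itr2 0)) := by
    have h0' : 0 < j2.length := List.length_pos_iff.mpr hne
    simp [PySem.List.pySetD, PySem.List.pySet?, PySem.List.pyIdx?,
      show -(j2.length : Int) ≤ -1 by omega]
  rw [hset]
  have hblock : PySem.List.slice all (some itr1) (some (itr1 + (L - 1)))
      = (all.drop itr1.toNat).take (L - 1).toNat := by
    rw [PySem.List.slice_toNat all h0 (by omega)]
    congr 1
    omega
  have hblen : (PySem.List.slice all (some itr1) (some (itr1 + (L - 1)))).length = (L - 1).toNat := by
    rw [hblock]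
    simp
    omega
  apply List.ext_getElem?
  intro m
  have hj2m : ∀ mm : Nat, j2[mm]? =
      if 1 ≤ (mm : Int) ∧ (mm : Int) < L - 1 ∧ itr1 + mm < itr2
      then some (some (PySem.List.pyGetD all (itr1 + mm) 0)) else j1[mm]? := by
    intro mm
    rw [hj2, joinFold_getElem? all itr1 itr2 (L - 1 - 1).toNat 1 (L - 1) j1 mm rfl (by omega)
      (by rw [hj1len]; omega)]
  by_cases hmL : m < L.toNat
  · rw [List.getElem?_set, hj2len]
    by_cases hlast : L.toNat - 1 = m
    · rw [if_pos hlast, if_pos (by omega)]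
      rw [List.getElem?_append_right (by rw [List.length_map, hblen]; omega)]
      rw [List.length_map, hblen]
      have : m - (L - 1).toNat = 0 := by omega
      rw [this]
      rfl
    · rw [if_neg hlast, hj2m m]
      have hmlt : (m : Int) < L - 1 := by omega
      have hTm : ((PySem.List.slice all (some itr1) (some (itr1 + (L - 1)))).map some
          ++ [some (PySem.List.pyGetD all itr2 0)])[m]?
          = some (some (PySem.List.pyGetD all (itr1 + m) 0)) := by
        rw [List.getElem?_append_left (by rw [List.length_map, hblen]; omega)]
        rw [List.getElem?_map, hblock]
        have hm1 : m < ((all.drop itr1.toNat).take (L - 1).toNat).length := by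
          simp
          omega
        rw [List.getElem?_eq_getElem hm1]
        have hg : PySem.List.pyGetD all (itr1 + m) 0 = all[(itr1 + m).toNat]'(by omega) := by
          rw [PySem.List.pyGetD_eq_getElem all 0 (by omega) (by omega)]
        have : ((all.drop itr1.toNat).take (L - 1).toNat)[m] = all[(itr1 + m).toNat]'(by omega) := by
          rw [List.getElem_take, List.getElem_drop]
          congr 1
          omega
        rw [this, hg]
        rfl
      rw [hTm]
      by_cases hm0 : m = 0
      · subst hm0
        rw [if_neg (by omega)]
        rw [hj1, PySem.List.pySetD_of_nonneg _ _ (le_refl (0 : Int)), List.getElem?_set]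
        simp [show 0 < L.toNat by omega]
      · rw [if_pos ⟨by omega, hmlt, by omega⟩]
  · -- beyond both lists: none = none
    rw [List.getElem?_eq_none (by rw [List.length_set, hj2len]; omega),
      List.getElem?_eq_none (by rw [List.length_append, List.length_map, hblen]; simp; omega)]

-- When the block does not fit, a None survives in the join.
lemma join_partial (all : List Int) (L itr1 itr2 : Int) (hL : 1 < L) (h0 : 0 ≤ itr1)
    (h12 : itr1 < itr2) (hnofit : itr2 < itr1 + (L - 1)) :
    none ∈ PySem.List.pySetD
      ((PySem.List.pyRange 1 (L - 1) 1).foldl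
        (fun j rp => if itr1 + rp ≥ itr2 then j
          else PySem.List.pySetD j rp (some (PySem.List.pyGetD all (itr1 + rp) 0)))
        (PySem.List.pySetD (List.replicate L.toNat none) 0 (some (PySem.List.pyGetD all itr1 0))))
      (-1) (some (PySem.List.pyGetD all itr2 0)) := by
  set j1 := PySem.List.pySetD (List.replicate L.toNat none) 0 (some (PySem.List.pyGetD all itr1 0)) with hj1
  have hj1len : j1.length = L.toNat := by
    simp [hj1, PySem.List.pySetD_of_nonneg _ _ (le_refl (0 : Int))]
  set j2 := (PySem.List.pyRange 1 (L - 1) 1).foldl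
      (fun j rp => if itr1 + rp ≥ itr2 then j
        else PySem.List.pySetD j rp (some (PySem.List.pyGetD all (itr1 + rp) 0))) j1 with hj2
  have hj2len : j2.length = L.toNat := by
    rw [hj2, joinFold_length all itr1 itr2 (L - 1 - 1).toNat 1 (L - 1) j1 rfl, hj1len]
  have hne : j2 ≠ [] := by
    intro h; rw [h] at hj2len; simp at hj2len; omega
  have hset : PySem.List.pySetD j2 (-1) (some (PySem.List.pyGetD all itr2 0))
      = j2.set (j2.length - 1) (some (PySem.List.pyGetD all itr2 0)) := by
    have h0' : 0 < j2.length := List.length_pos_iff.mpr hne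
    simp [PySem.List.pySetD, PySem.List.pySet?, PySem.List.pyIdx?,
      show -(j2.length : Int) ≤ -1 by omega]
  rw [hset]
  set m0 := (itr2 - itr1).toNat with hm0
  have hm0i : (m0 : Int) = itr2 - itr1 := by omega
  have hget : (j2.set (j2.length - 1) (some (PySem.List.pyGetD all itr2 0)))[m0]? = some none := by
    rw [List.getElem?_set, hj2len, if_neg (by omega)]
    rw [hj2, joinFold_getElem? all itr1 itr2 (L - 1 - 1).toNat 1 (L - 1) j1 m0 rfl (by omega)
      (by rw [hj1len]; omega)]
    rw [if_neg (by omega)]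
    rw [hj1, PySem.List.pySetD_of_nonneg _ _ (le_refl (0 : Int)), List.getElem?_set, if_neg (by omega)]
    rw [List.getElem?_eq_getElem (by simp; omega)]
    simp
  exact List.mem_of_getElem? hget

-- The inner loops agree for each itr1.
lemma inner_eq (old_values new_values : List Int) (L itr1 : Int) (hL : 1 < L)
    (h1 : 0 ≤ itr1) (acc : List (List Int)) :
    (PySem.List.pyRange (old_values.length : Int) ((old_values.length : Int) + (new_values.length : Int)) 1).foldl
      (fun acc itr2 =>
        if itr1 ≥ itr2 then acc
        else
          let join0 : List (Option Int) := List.replicate L.toNat none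
          let join1 := PySem.List.pySetD join0 0 (some (PySem.List.pyGetD (old_values ++ new_values) itr1 0))
          let join2 := (PySem.List.pyRange 1 (L - 1) 1).foldl
            (fun j rp => if itr1 + rp ≥ itr2 then j
              else PySem.List.pySetD j rp (some (PySem.List.pyGetD (old_values ++ new_values) (itr1 + rp) 0))) join1
          let join3 := PySem.List.pySetD join2 (-1) (some (PySem.List.pyGetD (old_values ++ new_values) itr2 0))
          if none ∉ join3 then acc ++ [join3.filterMap id] else acc) acc =
    (PySem.List.pyRange (max (old_values.length : Int) (itr1 + (L - 1))) ((old_values.length : Int) + (new_values.length : Int)) 1).foldl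
      (fun acc itr2 =>
        acc ++ [PySem.List.slice (old_values ++ new_values) (some itr1) (some (itr1 + (L - 1)))
          ++ [PySem.List.pyGetD (old_values ++ new_values) itr2 0]]) acc := by
  set all := old_values ++ new_values with hall
  set n : Int := (old_values.length : Int) with hn
  set tot : Int := (old_values.length : Int) + (new_values.length : Int) with htot
  have hlen : (all.length : Int) = tot := by
    simp [hall, htot]
  have step1 :
      (PySem.List.pyRange n tot 1).foldl
        (fun acc itr2 =>
          if itr1 ≥ itr2 then acc
          else
            let join0 : List (Option Int) := List.replicate L.toNat none
            let join1 := PySem.List.pySetD join0 0 (some (PySem.List.pyGetD all itr1 0))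
            let join2 := (PySem.List.pyRange 1 (L - 1) 1).foldl
              (fun j rp => if itr1 + rp ≥ itr2 then j
                else PySem.List.pySetD j rp (some (PySem.List.pyGetD all (itr1 + rp) 0))) join1
            let join3 := PySem.List.pySetD join2 (-1) (some (PySem.List.pyGetD all itr2 0))
            if none ∉ join3 then acc ++ [join3.filterMap id] else acc) acc =
      (PySem.List.pyRange n tot 1).foldl
        (fun acc itr2 =>
          if (fun x => decide (itr1 + (L - 1) ≤ x)) itr2
          then acc ++ [(fun itr2 => PySem.List.slice all (some itr1) (some (itr1 + (L - 1)))
            ++ [PySem.List.pyGetD all itr2 0]) itr2] else acc) acc := by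
    apply PySem.List.foldl_congr_mem'
    intro itr2 hmem acc'
    have hb := (PySem.List.mem_pyRange_one.mp hmem)
    have h2 : itr2 < (all.length : Int) := by omega
    by_cases hge : itr1 ≥ itr2
    · rw [if_pos hge, if_neg (by simp; omega)]
    · rw [if_neg hge]
      simp only []
      by_cases hfit : itr1 + (L - 1) ≤ itr2
      · rw [join_full all L itr1 itr2 hL h1 hfit h2]
        rw [if_pos (by simp)]
        rw [if_pos (by simp; omega)]
        congr 1
        simp
      · rw [if_neg (by simpa using join_partial all L itr1 itr2 hL h1 (by omega) (by omega))]
        rw [if_neg (by simp; omega)]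
  rw [step1, PySem.List.foldl_append_if, filter_pyRange_ge (itr1 + (L - 1)) (tot - n).toNat n tot rfl,
    PySem.List.foldl_append_singleton_eq_map]

-- ===== VERDICT (by name: the statement is the Claim_ definition above) =====
theorem get_new_combinations_spec : Claim_equal_get_new_combinations := by
  intro old_values new_values L _ hPre
  unfold Pre_get_new_combinations at hPre
  unfold Spec_get_new_combinations get_new_combinations get_new_combinations_alt
  have hlen : ((old_values ++ new_values).length : Int)
      = (old_values.length : Int) + (new_values.length : Int) := by simp
  simp only [hlen]
  apply PySem.List.foldl_congr_mem'
  intro itr1 hmem acc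
  have hb := PySem.List.mem_pyRange_one.mp hmem
  exact inner_eq old_values new_values L itr1 hPre hb.1 acc
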